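-- pv_equiv track=rewrite | github.com/iamvee/metamaterial-epicardial-sleeve | spheroidal_geometries/post_proc.py | _group_material_blocks
-- ===== SOURCE A (Python) =====
-- from typing import Callable, Dict, List, Set, Optional, Tuple, Union
--
-- def _group_material_blocks(blocks: List[str]) -> List[List[str]]:
--     material_groups = []
--     current_group = []
--
--     material_keywords = ('MATERIAL', 'DEPVAR', 'USER MATERIAL', 'DENSITY', 'ELASTIC')
--
--     for block in blocks:
--         block_upper_start = block.strip().upper().split(',')[0].strip()
--         if block_upper_start == 'MATERIAL':
--             if current_group:
--                 material_groups.append(current_group)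
--             current_group = [block]
--         elif current_group and block_upper_start in material_keywords:
--             current_group.append(block)
--         elif current_group:
--             material_groups.append(current_group)
--             current_group = []
--
--     if current_group:
--         material_groups.append(current_group)
--
--     return material_groups
-- ===== SOURCE B (Python) =====
-- from typing import List
--
--
-- def _group_material_blocks(blocks: List[str]) -> List[List[str]]:
--     # Precompute every block's leading keyword once, then scan group-start
--     # indices: each 'MATERIAL' opens a group that extends over consecutive
--     # continuation keywords; everything else is skipped.
--     continuation = {'DEPVAR', 'USER MATERIAL', 'DENSITY', 'ELASTIC'}
--     keys = [b.strip().upper().split(',')[0].strip() for b in blocks]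
--
--     groups = []
--     i, n = 0, len(blocks)
--     while i < n:
--         if keys[i] != 'MATERIAL':
--             i += 1
--             continue
--         j = i + 1
--         while j < n and keys[j] in continuation:
--             j += 1
--         groups.append(blocks[i:j])
--         i = j
--     return groups
-- ===== Notes on version B (the rewrite author's own statement) =====
-- stated objective: alternative
-- what changed: Replaces A's single-pass accumulator/flush state machine by a precomputed key list and an index scan with an outer group-start loop and an inner forward-extension loop over consecutive continuation keywords.
import Mathlib
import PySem

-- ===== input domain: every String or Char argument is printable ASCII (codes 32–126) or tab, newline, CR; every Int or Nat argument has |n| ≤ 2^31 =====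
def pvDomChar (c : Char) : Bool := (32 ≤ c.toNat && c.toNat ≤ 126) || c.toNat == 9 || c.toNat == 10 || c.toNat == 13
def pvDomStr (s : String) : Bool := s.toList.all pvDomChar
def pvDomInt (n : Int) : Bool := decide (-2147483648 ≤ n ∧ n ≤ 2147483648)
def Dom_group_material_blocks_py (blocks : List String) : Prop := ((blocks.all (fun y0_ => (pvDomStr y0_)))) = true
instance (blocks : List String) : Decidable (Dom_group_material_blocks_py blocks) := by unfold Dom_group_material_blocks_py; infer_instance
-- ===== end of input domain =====

-- B replaces A's accumulator/flush state machine by a key-per-block scan with an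
-- outer group-start loop and an inner forward-extension loop (alternative decomposition).

-- ===== PORT A =====
-- block.strip().upper().split(',')[0].strip()  (split(',') is always nonempty, so [0] never raises)
def pvKey (b : String) : String :=
  PySem.Str.strip ((((PySem.Str.split? (PySem.Str.upper (PySem.Str.strip b)) ",").getD []).headD ""))

def pvKeywords : List String := ["MATERIAL", "DEPVAR", "USER MATERIAL", "DENSITY", "ELASTIC"]

def pvStepA (st : List (List String) × List String) (block : String) :
    List (List String) × List String :=
  let k := pvKey block
  if k = "MATERIAL" then
    (if st.2 ≠ [] then st.1 ++ [st.2] else st.1, [block])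
  else if st.2 ≠ [] ∧ k ∈ pvKeywords then
    (st.1, st.2 ++ [block])
  else if st.2 ≠ [] then
    (st.1 ++ [st.2], [])
  else st

def group_material_blocks_py (blocks : List String) : List (List String) :=
  let st := blocks.foldl pvStepA ([], [])
  if st.2 ≠ [] then st.1 ++ [st.2] else st.1

-- ===== PORT B =====
def pvContinuation : List String := ["DEPVAR", "USER MATERIAL", "DENSITY", "ELASTIC"]

def pvContB (b : String) : Bool := decide (pvKey b ∈ pvContinuation)

-- outer scan over group starts; a 'MATERIAL' block takes the run of continuation
-- keywords after it as its group, scanning resumes where the extension stopped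
def pvScanB : List String → List (List String)
  | [] => []
  | b :: rest =>
    if pvKey b = "MATERIAL" then
      (b :: rest.takeWhile pvContB) :: pvScanB (rest.dropWhile pvContB)
    else
      pvScanB rest
termination_by l => l.length
decreasing_by
  · simpa using Nat.lt_succ_of_le (List.length_dropWhile_le pvContB rest)
  · simp

def group_material_blocks_py_alt (blocks : List String) : List (List String) :=
  pvScanB blocks

-- ===== PRECONDITION & SPEC =====
def Spec_group_material_blocks_py (blocks : List String) (out : List (List String)) : Prop := out = group_material_blocks_py_alt blocks
instance (blocks : List String) (out : List (List String)) : Decidable (Spec_group_material_blocks_py blocks out) := by unfold Spec_group_material_blocks_py; infer_instance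

-- ===== CLAIM (what is proved, stated in full; the proofs are below) =====
def Claim_equal_group_material_blocks_py : Prop := ∀ (blocks : List String), Dom_group_material_blocks_py blocks → Spec_group_material_blocks_py blocks (group_material_blocks_py blocks)

-- ===== LEMMAS AND PROOFS =====

theorem pvScanB_nil : pvScanB [] = [] := by conv_lhs => rw [pvScanB.eq_def]

theorem pvScanB_cons (b : String) (rest : List String) :
    pvScanB (b :: rest) =
      if pvKey b = "MATERIAL" then
        (b :: rest.takeWhile pvContB) :: pvScanB (rest.dropWhile pvContB)
      else pvScanB rest := by
  conv_lhs => rw [pvScanB.eq_def]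

-- flush the final state, as the tail of A
def pvFlush (st : List (List String) × List String) : List (List String) :=
  if st.2 ≠ [] then st.1 ++ [st.2] else st.1

-- the loop invariant: running A's fold from state (gs, cur) over l and flushing
-- equals gs, then (if a group is open) that group extended over the continuation
-- run of l, then B's scan of the remainder.
theorem pvInv (l : List String) (gs : List (List String)) (cur : List String) :
    pvFlush (l.foldl pvStepA (gs, cur)) =
      if cur = [] then gs ++ pvScanB l
      else gs ++ (cur ++ l.takeWhile pvContB) :: pvScanB (l.dropWhile pvContB) := by
  induction l generalizing gs cur with
  | nil =>
      by_cases h : cur = [] <;> simp [pvFlush, h, pvScanB_nil]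
  | cons b rest ih =>
      by_cases hm : pvKey b = "MATERIAL"
      · have hcont : pvContB b = false := by
          simp [pvContB, pvContinuation, hm]
        by_cases h : cur = []
        · have hstep : pvStepA (gs, cur) b = (gs, [b]) := by
            simp [pvStepA, hm, h]
          rw [List.foldl_cons, hstep, ih]
          rw [if_neg (by simp : ¬ ([b] : List String) = []), if_pos h,
              pvScanB_cons, if_pos hm]
          simp
        · have hstep : pvStepA (gs, cur) b = (gs ++ [cur], [b]) := by
            simp [pvStepA, hm, h]
          rw [List.foldl_cons, hstep, ih]
          rw [if_neg h, List.takeWhile_cons_of_neg (by simp [hcont]),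
              List.dropWhile_cons_of_neg (by simp [hcont]),
              pvScanB_cons, if_pos hm]
          simp
      · by_cases h : cur = []
        · -- no open group: every non-MATERIAL branch is a no-op
          have hstep : pvStepA (gs, cur) b = (gs, cur) := by
            simp [pvStepA, hm, h]
          rw [List.foldl_cons, hstep, ih]
          rw [if_pos h, if_pos h, pvScanB_cons, if_neg hm]
        · by_cases hk : pvKey b ∈ pvKeywords
          · -- continuation keyword: appended to the open group
            have hcont : pvContB b = true := by
              simp only [pvKeywords, List.mem_cons, List.not_mem_nil, or_false] at hk
              simp only [pvContB, pvContinuation, List.mem_cons, List.not_mem_nil,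
                or_false, decide_eq_true_eq]
              rcases hk with h1 | h1 | h1 | h1 | h1
              · exact absurd h1 hm
              · exact Or.inl h1
              · exact Or.inr (Or.inl h1)
              · exact Or.inr (Or.inr (Or.inl h1))
              · exact Or.inr (Or.inr (Or.inr h1))
            have hstep : pvStepA (gs, cur) b = (gs, cur ++ [b]) := by
              simp [pvStepA, hm, h, hk]
            rw [List.foldl_cons, hstep, ih]
            rw [if_neg h, if_neg (by simp : ¬ (cur ++ [b] = []))]
            rw [List.takeWhile_cons_of_pos hcont, List.dropWhile_cons_of_pos hcont]
            simp
          · -- stray block: flush the open group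
            have hcont : pvContB b = false := by
              simp only [pvContB, decide_eq_false_iff_not, pvContinuation,
                List.mem_cons, List.not_mem_nil, or_false]
              intro hmem
              apply hk
              simp only [pvKeywords, List.mem_cons, List.not_mem_nil, or_false]
              rcases hmem with h1 | h1 | h1 | h1
              · exact Or.inr (Or.inl h1)
              · exact Or.inr (Or.inr (Or.inl h1))
              · exact Or.inr (Or.inr (Or.inr (Or.inl h1)))
              · exact Or.inr (Or.inr (Or.inr (Or.inr h1)))
            have hstep : pvStepA (gs, cur) b = (gs ++ [cur], []) := by
              simp [pvStepA, hm, h, hk]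
            rw [List.foldl_cons, hstep, ih]
            rw [if_pos rfl, if_neg h,
                List.takeWhile_cons_of_neg (by simp [hcont]),
                List.dropWhile_cons_of_neg (by simp [hcont]),
                pvScanB_cons, if_neg hm]
            simp

-- ===== VERDICT (by name: the statement is the Claim_ definition above) =====
theorem group_material_blocks_py_spec : Claim_equal_group_material_blocks_py := by
  intro blocks _
  unfold Spec_group_material_blocks_py group_material_blocks_py group_material_blocks_py_alt
  have h := pvInv blocks [] []
  simpa [pvFlush] using h
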